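-- pv_equiv track=rewrite | github.com/by-AnnaBy/BasicPython_GB_Interactive | HW_lesson2/AnnaBy_BP_2-6.py | products_analysis
-- ===== SOURCE A (Python) =====
-- def products_analysis(product_list):
--     analysis = {}
--
--     for i, dict in product_list:
--         for key, value in dict.items():
--             analysis.setdefault(key, [])
--             if value not in analysis[key]:
--                 analysis[key].append(value)
--
--     return analysis
-- ===== SOURCE B (Python) =====
-- def products_analysis(product_list):
--     pairs = [(key, value) for i, d in product_list for key, value in d.items()]
--     keys = list(dict.fromkeys(key for key, value in pairs))
--     return {k: list(dict.fromkeys(value for key, value in pairs if key == k))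
--             for k in keys}
-- ===== Notes on version B (the rewrite author's own statement) =====
-- stated objective: alternative
-- what changed: B replaces A's single interleaved loop that maintains a dict with a membership check before every append by a three-stage pipeline: flatten all (key, value) pairs, compute the distinct keys in first-seen order, then build each key's list by an ordered dedup of a per-key filter pass.
import Mathlib
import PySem

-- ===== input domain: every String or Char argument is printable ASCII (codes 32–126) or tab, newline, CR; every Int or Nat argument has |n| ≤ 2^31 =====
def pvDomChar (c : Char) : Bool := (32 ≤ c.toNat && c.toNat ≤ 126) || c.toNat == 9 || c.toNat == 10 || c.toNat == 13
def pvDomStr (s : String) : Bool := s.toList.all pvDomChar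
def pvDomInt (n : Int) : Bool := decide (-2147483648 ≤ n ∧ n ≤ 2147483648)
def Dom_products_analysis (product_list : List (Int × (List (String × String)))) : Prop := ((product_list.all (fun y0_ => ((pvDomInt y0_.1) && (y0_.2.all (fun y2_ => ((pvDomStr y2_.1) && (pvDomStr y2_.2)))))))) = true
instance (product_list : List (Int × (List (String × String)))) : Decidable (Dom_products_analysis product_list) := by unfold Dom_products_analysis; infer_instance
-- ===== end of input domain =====

-- B replaces A's interleaved check-and-append dict loop by a flatten / distinct-keys / per-key-filter pipeline; same return value, proved equal.


-- ===== PORT A =====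
-- inner-loop body of A: analysis.setdefault(key, []) then append value if not already present
def pvAStep (a : PySem.Dict String (List String)) (kv : String × String) : PySem.Dict String (List String) :=
  let a1 := a.setdefault kv.1 ([] : List String)
  if ((a1.getD kv.1 []).contains kv.2) = false then a1.insert kv.1 (a1.getD kv.1 [] ++ [kv.2]) else a1

def products_analysis (product_list : List (Int × (List (String × String)))) : List (String × List String) :=
  (product_list.foldl
    (fun a pr => (PySem.Dict.ofList pr.2).items.foldl pvAStep a)
    PySem.Dict.empty).items

-- ===== PORT B =====
-- B: flatten all (key, value) pairs; distinct keys in first-seen order; per key, ordered dedup of a filter pass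
def products_analysis_alt (product_list : List (Int × (List (String × String)))) : List (String × List String) :=
  let pairs := product_list.flatMap (fun pr => (PySem.Dict.ofList pr.2).items)
  let keys := PySem.List.dedup (pairs.map Prod.fst)
  keys.map (fun k => (k, PySem.List.dedup ((pairs.filter (fun p => p.1 == k)).map Prod.snd)))

-- ===== PRECONDITION & SPEC =====
def Spec_products_analysis (product_list : List (Int × (List (String × String)))) (out : List (String × List String)) : Prop := out = products_analysis_alt product_list
instance (product_list : List (Int × (List (String × String)))) (out : List (String × List String)) : Decidable (Spec_products_analysis product_list out) := by unfold Spec_products_analysis; infer_instance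

-- ===== CLAIM (what is proved, stated in full; the proofs are below) =====
def Claim_equal_products_analysis : Prop := ∀ (product_list : List (Int × (List (String × String)))), Dom_products_analysis product_list → Spec_products_analysis product_list (products_analysis product_list)

-- ===== LEMMAS AND PROOFS =====

-- closed form for A's dict after consuming a flat pair list, starting from dict a
def pvSpec (a : PySem.Dict String (List String)) (ps : List (String × String)) : List (String × List String) :=
  (PySem.List.dedup (a.keys ++ ps.map Prod.fst)).map
    (fun k => (k, PySem.List.dedup (a.getD k [] ++ (ps.filter (fun p => p.1 == k)).map Prod.snd)))

def pvInv (a : PySem.Dict String (List String)) : Prop :=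
  a.keys.Nodup ∧ ∀ k, PySem.List.dedup (a.getD k []) = a.getD k []

theorem pvOfList_nodup {α : Type} [BEq α] [LawfulBEq α] (xs : List α) (h : xs.Nodup) :
    PySem.Set.ofList xs = xs := by
  induction xs using List.reverseRecOn with
  | nil => rfl
  | append_singleton ys y ih =>
    have h1 : ys.Nodup := List.Nodup.of_append_left h
    have hy : y ∉ ys := fun hm => (List.disjoint_of_nodup_append h) hm (by simp)
    rw [PySem.Set.ofList_append_singleton, ih h1, PySem.Set.add_of_not_mem hy]

theorem pvAStep_keys (a : PySem.Dict String (List String)) (k v : String) :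
    (pvAStep a (k, v)).keys = if a.contains k then a.keys else a.keys ++ [k] := by
  by_cases hc : a.contains k = true
  · simp only [pvAStep, PySem.Dict.setdefault_of_contains _ _ hc, hc, if_true]
    split_ifs with h
    · exact PySem.Dict.keys_insert_of_contains _ _ hc
    · rfl
  · have hc' : a.contains k = false := by simpa using hc
    have hgd : a.getD k [] = [] := PySem.Dict.getD_of_not_contains _ _ hc'
    simp only [pvAStep, PySem.Dict.setdefault_of_not_contains _ _ hc',
      PySem.Dict.getD_insert_self, List.contains_nil, hc']
    simp [PySem.Dict.keys_insert_of_contains _ _ (PySem.Dict.contains_insert_self a k []),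
      PySem.Dict.keys_insert_of_not_contains _ _ hc']

theorem pvAStep_getD (a : PySem.Dict String (List String)) (k v k' : String) :
    (pvAStep a (k, v)).getD k' [] =
      if k' = k then (if (a.getD k []).contains v then a.getD k [] else a.getD k [] ++ [v])
      else a.getD k' [] := by
  by_cases hc : a.contains k = true
  · simp only [pvAStep, PySem.Dict.setdefault_of_contains _ _ hc]
    split_ifs with h1 h2 h2 <;> simp_all [PySem.Dict.getD_insert]
  · have hc' : a.contains k = false := by simpa using hc
    have hgd : a.getD k [] = [] := PySem.Dict.getD_of_not_contains _ _ hc'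
    simp only [pvAStep, PySem.Dict.setdefault_of_not_contains _ _ hc',
      PySem.Dict.getD_insert_self, List.contains_nil, hgd]
    simp [PySem.Dict.getD_insert]
    split_ifs <;> simp_all

theorem pvAStep_inv (a : PySem.Dict String (List String)) (k v : String)
    (h : pvInv a) : pvInv (pvAStep a (k, v)) := by
  obtain ⟨hnd, hde⟩ := h
  constructor
  · rw [pvAStep_keys]
    split_ifs with hc
    · exact hnd
    · have hk : k ∉ a.keys := fun hm => hc ((PySem.Dict.contains_iff_mem_keys a k).mpr hm)
      simp [List.nodup_append, hnd]
      intro x hx hxk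
      exact hk (hxk ▸ hx)
  · intro k'
    rw [pvAStep_getD]
    split_ifs with h1 h2
    · exact hde k
    · have hv : v ∉ a.getD k [] := by simpa using h2
      have hself : PySem.Set.ofList (a.getD k []) = a.getD k [] := by
        simpa [PySem.List.dedup_eq_ofList] using hde k
      rw [PySem.List.dedup_eq_ofList, PySem.Set.ofList_append_singleton, hself,
        PySem.Set.add_of_not_mem hv]
    · exact hde k'

theorem pvSpec_step (a : PySem.Dict String (List String)) (k v : String)
    (rest : List (String × String)) (h : pvInv a) :
    pvSpec (pvAStep a (k, v)) rest = pvSpec a ((k, v) :: rest) := by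
  obtain ⟨hnd, hde⟩ := h
  have hkeys : PySem.Set.ofList ((pvAStep a (k, v)).keys) = PySem.Set.add (PySem.Set.ofList a.keys) k := by
    rw [pvAStep_keys]
    split_ifs with hc
    · rw [PySem.Set.add_of_mem]
      rw [PySem.Set.mem_ofList]
      exact (PySem.Dict.contains_iff_mem_keys a k).mp hc
    · exact PySem.Set.ofList_append_singleton _ _
  have hK : PySem.List.dedup ((pvAStep a (k, v)).keys ++ rest.map Prod.fst)
      = PySem.List.dedup (a.keys ++ (((k, v) :: rest).map Prod.fst)) := by
    simp only [PySem.List.dedup_eq_ofList, PySem.Set.ofList_append, List.map_cons,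
      PySem.Set.update_cons, hkeys]
  unfold pvSpec
  rw [hK]
  apply List.map_congr_left
  intro k' _
  by_cases hk : k' = k
  · subst hk
    have hcur : PySem.Set.ofList (a.getD k' []) = a.getD k' [] := by
      simpa [PySem.List.dedup_eq_ofList] using hde k'
    rw [pvAStep_getD]
    simp only [List.filter_cons, beq_self_eq_true, if_true, List.map_cons]
    have hcons : a.getD k' [] ++ v :: (List.filter (fun p => p.1 == k') rest).map Prod.snd
        = (a.getD k' [] ++ [v]) ++ (List.filter (fun p => p.1 == k') rest).map Prod.snd := by
      simp
    rw [hcons]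
    simp only [PySem.List.dedup_eq_ofList, PySem.Set.ofList_append, hcur]
    congr 1
    rw [PySem.Set.update_cons, PySem.Set.update_nil]
    by_cases hv : v ∈ a.getD k' []
    · rw [if_pos (by simpa using hv), hcur, PySem.Set.add_of_mem hv]
    · rw [if_neg (by simpa using hv), PySem.Set.ofList_append_singleton, hcur]
  · rw [pvAStep_getD, if_neg hk]
    have : ((k, v).1 == k') = false := by simpa using Ne.symm hk
    simp [this]

theorem pvFold_spec (ps : List (String × String)) (a : PySem.Dict String (List String))
    (h : pvInv a) : (ps.foldl pvAStep a).items = pvSpec a ps := by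
  induction ps generalizing a with
  | nil =>
    unfold pvSpec
    simp only [List.map_nil, List.append_nil, List.filter_nil]
    rw [PySem.List.dedup_eq_ofList, pvOfList_nodup _ h.1]
    rw [List.foldl_nil, PySem.Dict.items_eq_map_keys a h.1 []]
    apply List.map_congr_left
    intro k _
    rw [h.2 k]
  | cons hd tl ih =>
    obtain ⟨k, v⟩ := hd
    rw [List.foldl_cons, ih _ (pvAStep_inv a k v h), pvSpec_step a k v tl h]

theorem pvFlatten (pl : List (Int × (List (String × String)))) (a : PySem.Dict String (List String)) :
    pl.foldl (fun a pr => (PySem.Dict.ofList pr.2).items.foldl pvAStep a) a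
      = (pl.flatMap (fun pr => (PySem.Dict.ofList pr.2).items)).foldl pvAStep a := by
  induction pl generalizing a with
  | nil => rfl
  | cons hd tl ih => simp [List.flatMap_cons, List.foldl_append, ih]

-- ===== VERDICT (by name: the statement is the Claim_ definition above) =====
theorem products_analysis_spec : Claim_equal_products_analysis := by
  intro pl _
  unfold Spec_products_analysis products_analysis products_analysis_alt
  rw [pvFlatten, pvFold_spec _ _ ⟨PySem.Dict.nodup_keys_empty, fun k => by simp [PySem.Dict.getD_empty]⟩]
  unfold pvSpec
  simp [PySem.Dict.keys_empty, PySem.Dict.getD_empty]
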